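-- pv_equiv track=rewrite | github.com/QingyuFeng/GeoAPEXOL | gisutils/getWatershedsbyField.py | removeextraWS
-- ===== SOURCE A (Python) =====
-- def removeextraWS(wssubdict):
--
--     # This function was written to remove single subareas already
--     # contained in other watersheds.
--     # The steps include:
--     # 1. Construct a list ordered by length of watershed subarea numbers.
--     # 2. Construct a list of watershed only have 1 subareas.
--     # 3. Loop through each of the first list, if the one subarea is
--     # found in one larger watershed, remove the subarea from the list.
--     wslist = sorted([v for k, v in wssubdict.items()], key=len, reverse=True)
--
--     singlesublist = [v for k, v in wssubdict.items() if (len(v) == 1)]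
--
--     subtobepoped = []
--
--     for wsid in wslist:
--         if len(wsid) > 1:
--             for subno in singlesublist:
--                 if subno[0] in wsid:
--                     subtobepoped.append(subno[0])
--
--     for rmid in subtobepoped:
--         wslist.remove([rmid])
--
--     # Create a new dictionary
--     wsdict = {}
--
--     for wsid2 in range(len(wslist)):
--         wsdict[wsid2+1] = wslist[wsid2]
--
--     return wsdict
-- ===== SOURCE B (Python) =====
-- def removeextraWS(wssubdict):
--     # A set of all subareas occurring in multi-subarea watersheds; singles
--     # contained there are dropped in a single filter pass, then renumbered 1..n.
--     wslist = sorted(wssubdict.values(), key=len, reverse=True)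
--     bigelems = set()
--     for ws in wslist:
--         if len(ws) > 1:
--             bigelems.update(ws)
--     kept = [ws for ws in wslist if not (len(ws) == 1 and ws[0] in bigelems)]
--     return {i + 1: ws for i, ws in enumerate(kept)}
-- ===== Notes on version B (the rewrite author's own statement) =====
-- stated objective: alternative
-- what changed: Instead of A's nested scan of every single-subarea list against every large watershed followed by repeated list.remove calls, B builds one set of all elements of multi-subarea watersheds and drops the contained singles in a single filter pass.
import Mathlib
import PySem

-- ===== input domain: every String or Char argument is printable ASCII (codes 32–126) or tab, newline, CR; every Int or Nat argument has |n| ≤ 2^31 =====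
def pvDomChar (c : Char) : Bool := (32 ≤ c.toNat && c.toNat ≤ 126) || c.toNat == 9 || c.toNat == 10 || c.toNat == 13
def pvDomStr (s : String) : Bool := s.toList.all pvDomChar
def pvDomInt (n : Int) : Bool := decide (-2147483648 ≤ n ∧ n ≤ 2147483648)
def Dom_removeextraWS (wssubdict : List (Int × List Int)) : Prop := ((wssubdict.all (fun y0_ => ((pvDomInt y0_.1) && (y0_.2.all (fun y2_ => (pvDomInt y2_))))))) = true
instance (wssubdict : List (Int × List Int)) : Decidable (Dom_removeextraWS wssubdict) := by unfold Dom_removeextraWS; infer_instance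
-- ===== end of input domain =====

-- B replaces A's nested scans and repeated list.remove with one set of the
-- elements of multi-subarea watersheds and a single filter pass (alternative).

-- ===== PORT A =====
def removeextraWS (wssubdict : List (Int × List Int)) : List (Int × List Int) :=
  let vals := (PySem.Dict.ofList wssubdict).values
  let wslist := PySem.List.sorted vals (fun v => v.length) true
  let singlesublist := vals.filter (fun v => v.length == 1)
  let subtobepoped := wslist.foldl (fun acc wsid =>
      if 1 < wsid.length then
        -- subno[0]: every element of singlesublist has length 1, so headD is exact
        singlesublist.foldl (fun acc2 subno =>
          if wsid.contains (subno.headD 0) then acc2 ++ [subno.headD 0] else acc2) acc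
      else acc) []
  -- wslist.remove([rmid]); remove? = none is Python's ValueError, excluded by Pre_
  let wslist2 := subtobepoped.foldl (fun acc rmid =>
      match acc with
      | none => none
      | some l => PySem.List.remove? l [rmid]) (some wslist)
  match wslist2 with
  | none => []   -- unreachable under Pre_removeextraWS (Python raises ValueError here)
  | some l =>
    ((PySem.List.pyRange 0 (l.length : Int) 1).foldl
      (fun d i => d.insert (i + 1) (PySem.List.pyGetD l i [])) PySem.Dict.empty).items

-- ===== PORT B =====
def removeextraWS_alt (wssubdict : List (Int × List Int)) : List (Int × List Int) :=
  let wslist := PySem.List.sorted (PySem.Dict.ofList wssubdict).values (fun v => v.length) true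
  let bigelems := wslist.foldl (fun s ws => if 1 < ws.length then PySem.Set.update s ws else s)
      PySem.Set.empty
  let kept := wslist.filter (fun ws => !(ws.length == 1 && PySem.Set.contains bigelems (ws.headD 0)))
  ((PySem.List.enumerate kept 0).foldl (fun d p => d.insert (p.1 + 1) p.2) PySem.Dict.empty).items

-- ===== PRECONDITION & SPEC =====
-- Pre_ excludes exactly the inputs on which A raises ValueError: a single-subarea
-- value whose element lies in two or more multi-subarea watersheds makes A's
-- removal loop call wslist.remove more often than [s] occurs.
def Pre_removeextraWS (wssubdict : List (Int × List Int)) : Prop :=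
  ∀ v ∈ (PySem.Dict.ofList wssubdict).values, v.length = 1 →
    ((PySem.Dict.ofList wssubdict).values.countP
      (fun u => 1 < u.length && u.contains (v.headD 0))) ≤ 1
instance (wssubdict : List (Int × List Int)) : Decidable (Pre_removeextraWS wssubdict) := by unfold Pre_removeextraWS; infer_instance
def pvWitness_removeextraWS : (List (Int × List Int)) := [(1, [5]), (2, [6, 7]), (3, [8])]

def Spec_removeextraWS (wssubdict : List (Int × List Int)) (out : List (Int × List Int)) : Prop := out = removeextraWS_alt wssubdict
instance (wssubdict : List (Int × List Int)) (out : List (Int × List Int)) : Decidable (Spec_removeextraWS wssubdict out) := by unfold Spec_removeextraWS; infer_instance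

-- ===== CLAIM (what is proved, stated in full; the proofs are below) =====
def Claim_equal_removeextraWS : Prop := ∀ (wssubdict : List (Int × List Int)), Dom_removeextraWS wssubdict → Pre_removeextraWS wssubdict → Spec_removeextraWS wssubdict (removeextraWS wssubdict)

-- ===== LEMMAS AND PROOFS =====

theorem pvFilterErase {α : Type} [BEq α] [LawfulBEq α] (p : α → Bool) (a : α) (ws : List α)
    (h : p a = false) : (ws.erase a).filter p = ws.filter p := by
  induction ws with
  | nil => rfl
  | cons x xs ih =>
    by_cases hx : x = a
    · subst hx; simp [List.erase_cons_head, h]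
    · rw [List.erase_cons_tail (by simpa using hx)]
      simp only [List.filter_cons, ih]

theorem pvRemoveFold (L : List Int) (ws : List (List Int))
    (h : ∀ s ∈ L, ws.count [s] = L.count s) :
    L.foldl (fun acc rmid =>
        match acc with
        | none => none
        | some l => PySem.List.remove? l [rmid]) (some ws)
      = some (ws.filter (fun v => !((L.map (fun s => [s])).contains v))) := by
  induction L generalizing ws with
  | nil => simp
  | cons s L ih =>
    have hcnt : ws.count [s] = L.count s + 1 := by
      have := h s (by simp)
      simpa [List.count_cons_self] using this
    have hmem : [s] ∈ ws := by
      rw [← List.count_pos_iff]; omega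
    have hL : ∀ t ∈ L, (ws.erase [s]).count [t] = L.count t := by
      intro t ht
      by_cases hts : t = s
      · subst hts
        rw [List.count_erase_self, hcnt]; omega
      · have hnel : ([t] : List Int) ≠ [s] := by simp [hts]
        rw [List.count_erase_of_ne hnel]
        rw [h t (by simp [ht])]
        simp [List.count_cons]
        omega
    have step : (List.foldl (fun acc rmid =>
        match acc with
        | none => none
        | some l => PySem.List.remove? l [rmid]) (some ws) (s :: L))
        = L.foldl (fun acc rmid =>
            match acc with
            | none => none
            | some l => PySem.List.remove? l [rmid]) (some (ws.erase [s])) := by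
      have hrm : PySem.List.remove? ws [s] = some (ws.erase [s]) :=
        PySem.List.remove?_eq_some_erase ws [s] hmem
      simp [List.foldl_cons, hrm]
    rw [step, ih _ hL]
    congr 1
    have hps : (fun v => !(((s :: L).map (fun s => [s])).contains v)) ([s] : List Int) = false := by
      simp
    calc (ws.erase [s]).filter (fun v => !((L.map (fun s => [s])).contains v))
        = (ws.erase [s]).filter (fun v => !(((s :: L).map (fun s => [s])).contains v)) := by
          apply List.filter_congr
          intro v hv
          by_cases hvs : v = [s]
          · subst hvs
            have hpos : 0 < (ws.erase [s]).count [s] := List.count_pos_iff.mpr hv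
            rw [List.count_erase_self, hcnt] at hpos
            have hsL : s ∈ L := by rw [← List.count_pos_iff]; omega
            have hm : ([s] : List Int) ∈ L.map (fun s => [s]) := List.mem_map_of_mem hsL
            simp [hm]
          · have hne : ¬ (([s] : List Int) = v) := fun hh => hvs hh.symm
            simp
            exact fun _ => hvs
      _ = ws.filter (fun v => !(((s :: L).map (fun s => [s])).contains v)) :=
          pvFilterErase (fun v => !(((s :: L).map (fun s => [s])).contains v)) [s] ws hps

theorem pvMemUpdateFold (l : List (List Int)) (s : PySem.Set Int) (y : Int) :
    (y ∈ l.foldl (fun s w => PySem.Set.update s w) s) ↔ y ∈ s ∨ ∃ w ∈ l, y ∈ w := by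
  induction l generalizing s with
  | nil => simp
  | cons w l ih =>
    rw [List.foldl_cons, ih]
    simp [PySem.Set.mem_update]
    tauto

theorem pvMemBig (wslist : List (List Int)) (y : Int) :
    (y ∈ wslist.foldl (fun s ws => if 1 < ws.length then PySem.Set.update s ws else s)
        PySem.Set.empty) ↔ ∃ w ∈ wslist, 1 < w.length ∧ y ∈ w := by
  rw [PySem.List.foldl_ite_eq_foldl_filter (p := fun ws => 1 < ws.length)
    (f := fun s ws => PySem.Set.update s ws)]
  rw [pvMemUpdateFold]
  simp [PySem.Set.empty, List.mem_filter]
  constructor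
  · rintro ⟨w, ⟨hw, hlen⟩, hy⟩; exact ⟨w, hw, by simpa using hlen, hy⟩
  · rintro ⟨w, hw, hlen, hy⟩; exact ⟨w, ⟨hw, by simpa using hlen⟩, hy⟩

theorem pvSumIte (l : List (List Int)) (m : Nat) (s : Int) :
    (l.map (fun w => if s ∈ w then m else 0)).sum = l.countP (fun w => decide (s ∈ w)) * m := by
  induction l with
  | nil => simp
  | cons w l ih =>
    by_cases hw : s ∈ w <;> simp [hw, ih, Nat.add_mul, Nat.add_comm]

theorem pvPopCount (wslist singles : List (List Int))
    (hsingle : ∀ sub ∈ singles, sub = [sub.headD 0]) (s : Int) :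
    ((wslist.filter (fun w => decide (1 < w.length))).flatMap
      (fun w => (singles.filter (fun sub => w.contains (sub.headD 0))).map
        (fun sub => sub.headD 0))).count s
    = wslist.countP (fun w => decide (1 < w.length) && w.contains s) * singles.count [s] := by
  rw [List.count_flatMap]
  have hinner : ∀ w : List Int,
      ((singles.filter (fun sub => w.contains (sub.headD 0))).map (fun sub => sub.headD 0)).count s
      = if s ∈ w then singles.count [s] else 0 := by
    intro w
    rw [List.count_eq_countP, List.countP_map, List.countP_filter]
    have hcg : ∀ sub ∈ singles,
        ((((fun x => x == s) ∘ (fun sub => sub.headD 0)) sub && w.contains (sub.headD 0)) = true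
        ↔ ((sub == [s]) && decide (s ∈ w)) = true) := by
      intro sub hsub
      by_cases hh : sub.headD 0 = s
      · have hs2 : sub = [s] := by rw [hsingle sub hsub, hh]
        simp [hs2]
      · have hns : ¬ (sub = [s]) := fun hc => hh (by rw [hc]; rfl)
        have hh' : sub.head?.getD 0 ≠ s := by simpa [List.headD_eq_head?_getD] using hh
        simp [hh', hns]
    rw [List.countP_congr hcg]
    by_cases hw : s ∈ w
    · simp [hw, List.count_eq_countP]
    · simp [hw]
  calc ((wslist.filter (fun w => decide (1 < w.length))).map
        (fun w => ((singles.filter (fun sub => w.contains (sub.headD 0))).map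
          (fun sub => sub.headD 0)).count s)).sum
      = ((wslist.filter (fun w => decide (1 < w.length))).map
          (fun w => if s ∈ w then singles.count [s] else 0)).sum := by
        congr 1; exact List.map_congr_left (fun w _ => hinner w)
    _ = (wslist.filter (fun w => decide (1 < w.length))).countP (fun w => decide (s ∈ w))
          * singles.count [s] := pvSumIte _ _ _
    _ = wslist.countP (fun w => decide (1 < w.length) && w.contains s) * singles.count [s] := by
        rw [List.countP_filter]
        congr 1
        apply List.countP_congr
        intro w _
        simp [Bool.and_comm]

theorem pvPopMem (wslist singles : List (List Int))
    (hsingle : ∀ sub ∈ singles, sub = [sub.headD 0]) (s : Int) :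
    (s ∈ (wslist.filter (fun w => decide (1 < w.length))).flatMap
      (fun w => (singles.filter (fun sub => w.contains (sub.headD 0))).map
        (fun sub => sub.headD 0)))
    ↔ ([s] ∈ singles ∧ ∃ w ∈ wslist, 1 < w.length ∧ s ∈ w) := by
  simp only [List.mem_flatMap, List.mem_map, List.mem_filter]
  constructor
  · rintro ⟨w, ⟨hw, hlen⟩, sub, ⟨hsub, hcont⟩, hhead⟩
    have hs : sub = [s] := by rw [hsingle sub hsub, hhead]
    subst hs
    refine ⟨hsub, w, hw, by simpa using hlen, ?_⟩
    simpa [List.contains_iff_mem] using hcont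
  · rintro ⟨hmem, w, hw, hlen, hs⟩
    exact ⟨w, ⟨hw, by simpa using hlen⟩, [s], ⟨hmem, by simpa [List.contains_iff_mem] using hs⟩, rfl⟩

theorem pvDictBuild (l : List (List Int)) :
    ((PySem.List.pyRange 0 (l.length : Int) 1).foldl
      (fun d i => d.insert (i + 1) (PySem.List.pyGetD l i [])) PySem.Dict.empty)
    = ((PySem.List.enumerate l 0).foldl
      (fun d p => d.insert (p.1 + 1) p.2) PySem.Dict.empty) := by
  rw [PySem.List.enumerate_eq_map_pyRange l ([] : List Int), List.foldl_map]
  simp [PySem.List.len_eq]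

-- ===== VERDICT (by name: the statement is the Claim_ definition above) =====
theorem removeextraWS_spec : Claim_equal_removeextraWS := by
  intro w _ hPre
  unfold Spec_removeextraWS removeextraWS removeextraWS_alt
  simp only []
  set vals := (PySem.Dict.ofList w).values with hvals
  set wslist := PySem.List.sorted vals (fun v => v.length) true with hws
  set singles := vals.filter (fun v => v.length == 1) with hsing
  have hperm : wslist.Perm vals := PySem.List.sorted_perm vals (fun v => v.length) true
  have hsingle : ∀ sub ∈ singles, sub = [sub.headD 0] := by
    intro sub hsub
    have hlen : (sub.length == 1) = true := (List.mem_filter.mp hsub).2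
    match sub with
    | [a] => rfl
    | [] => simp at hlen
    | a :: b :: t => simp at hlen
  have hpop : wslist.foldl (fun acc wsid => if 1 < wsid.length then
        singles.foldl (fun acc2 subno =>
          if wsid.contains (subno.headD 0) then acc2 ++ [subno.headD 0] else acc2) acc
      else acc) ([] : List Int)
      = (wslist.filter (fun w' => decide (1 < w'.length))).flatMap
          (fun w' => (singles.filter (fun sub => w'.contains (sub.headD 0))).map
            (fun sub => sub.headD 0)) := by
    rw [PySem.List.foldl_congr_mem wslist _
      (fun acc wsid => if 1 < wsid.length then
        acc ++ ((singles.filter (fun sub => wsid.contains (sub.headD 0))).map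
          (fun sub => sub.headD 0)) else acc) []
      (by
        intro acc x _
        by_cases h1 : 1 < x.length
        · simp only [if_pos h1, PySem.List.foldl_append_if]
        · simp [h1])]
    rw [PySem.List.foldl_ite_eq_foldl_filter (p := fun wsid : List Int => 1 < wsid.length)
      (f := fun acc w' => acc ++ ((singles.filter (fun sub => w'.contains (sub.headD 0))).map
        (fun sub => sub.headD 0)))]
    rw [PySem.List.foldl_append_eq_flatMap]
    simp
  rw [hpop]
  set pop := (wslist.filter (fun w' => decide (1 < w'.length))).flatMap
      (fun w' => (singles.filter (fun sub => w'.contains (sub.headD 0))).map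
        (fun sub => sub.headD 0)) with hpopdef
  have hcount : ∀ s ∈ pop, wslist.count [s] = pop.count s := by
    intro s hs
    rw [hpopdef, pvPopCount wslist singles hsingle s]
    obtain ⟨hsingmem, wbig, hwbig, hlen, hsin⟩ := (pvPopMem wslist singles hsingle s).mp hs
    have hle : wslist.countP (fun w' => decide (1 < w'.length) && w'.contains s) ≤ 1 := by
      rw [hperm.countP_eq]
      have hsv : ([s] : List Int) ∈ vals := (List.mem_filter.mp hsingmem).1
      have := hPre [s] hsv rfl
      simpa using this
    have hge : 1 ≤ wslist.countP (fun w' => decide (1 < w'.length) && w'.contains s) := by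
      rw [hperm.countP_eq]
      apply List.countP_pos_iff.mpr
      exact ⟨wbig, hperm.subset hwbig, by simp [hlen, hsin]⟩
    have h1 : wslist.countP (fun w' => decide (1 < w'.length) && w'.contains s) = 1 := by omega
    rw [h1, Nat.one_mul]
    rw [hperm.count_eq, hsing]
    exact (List.count_filter (by simp)).symm
  rw [pvRemoveFold pop wslist hcount]
  simp only []
  have hfeq : wslist.filter (fun v => !((pop.map (fun s => [s])).contains v))
      = wslist.filter (fun v => !(v.length == 1 &&
          (wslist.foldl (fun s ws => if 1 < ws.length then PySem.Set.update s ws else s)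
            PySem.Set.empty).contains (v.headD 0))) := by
    apply List.filter_congr
    intro v hv
    have hiff : ((pop.map (fun s => [s])).contains v = true)
        ↔ ((v.length == 1 &&
            (wslist.foldl (fun s ws => if 1 < ws.length then PySem.Set.update s ws else s)
              PySem.Set.empty).contains (v.headD 0)) = true) := by
      constructor
      · intro hc
        have hvm : v ∈ pop.map (fun s => [s]) := by
          simpa [List.contains_iff_mem] using hc
        obtain ⟨s, hs, rfl⟩ := List.mem_map.mp hvm
        obtain ⟨hsingmem, wb, hwb, hlen, hsin⟩ :=
          (pvPopMem wslist singles hsingle s).mp (by rwa [hpopdef] at hs)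
        have hbig : s ∈ wslist.foldl
            (fun s ws => if 1 < ws.length then PySem.Set.update s ws else s) PySem.Set.empty :=
          (pvMemBig wslist s).mpr ⟨wb, hwb, hlen, hsin⟩
        simpa [PySem.Set.contains_iff] using hbig
      · intro hc
        have hc' := hc
        simp only [Bool.and_eq_true, beq_iff_eq] at hc'
        obtain ⟨h1, h2⟩ := hc'
        have hvv : v ∈ vals := hperm.subset hv
        have hvs : v ∈ singles := List.mem_filter.mpr ⟨hvv, by simp [h1]⟩
        have hveq : v = [v.headD 0] := hsingle v hvs
        obtain ⟨wb, hwb, hlen, hsin⟩ := (pvMemBig wslist (v.headD 0)).mp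
          (by simpa [PySem.Set.contains_iff] using h2)
        have hsp : (v.headD 0) ∈ pop := by
          rw [hpopdef]
          exact (pvPopMem wslist singles hsingle (v.headD 0)).mpr
            ⟨by rwa [← hveq], wb, hwb, hlen, hsin⟩
        have : v ∈ pop.map (fun s => [s]) := by
          rw [hveq]
          exact List.mem_map_of_mem hsp
        simpa [List.contains_iff_mem] using this
    have hb : (pop.map (fun s => [s])).contains v
        = (v.length == 1 &&
          (wslist.foldl (fun s ws => if 1 < ws.length then PySem.Set.update s ws else s)
            PySem.Set.empty).contains (v.headD 0)) := by
      rw [Bool.eq_iff_iff]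
      simpa using hiff
    exact congrArg (fun b => !b) hb
  rw [hfeq, pvDictBuild]
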